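-- pv_equiv track=rewrite | github.com/marcianoo21/ImageProcessing | erosion_dilation.py | imgDilation
-- ===== SOURCE A (Python) =====
-- def imgDilation(img, struct):
--     rows = len(img)
--     cols = len(img[0])
--
--     struct_len = len(struct[0])
--
--     dilated_img = [[0 for _ in range(cols)] for _ in range(rows)]
--
--     for i in range(rows):
--         for j in range(cols):
--             if img[i][j] == 1:
--                 for k in range(struct_len):
--                     if i < rows and j + k < cols:
--                         if dilated_img[i][j + k] == 0:
--                             dilated_img[i][j + k] = 1
--
--     return dilated_img
-- ===== SOURCE B (Python) =====
-- def imgDilation(img, struct):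
--     cols = len(img[0])
--     struct_len = len(struct[0])
--     result = []
--     for row in img:
--         last = None
--         new_row = []
--         for j in range(cols):
--             if row[j] == 1:
--                 last = j
--             new_row.append(1 if last is not None and j - last < struct_len else 0)
--         result.append(new_row)
--     return result
-- ===== Notes on version B (the rewrite author's own statement) =====
-- stated objective: alternative
-- what changed: B replaces A's per-pixel inner loop over the structuring-element width (writing 1s into a preallocated zero matrix) by a single left-to-right pass per row that tracks the index of the last 1 seen and emits 1 when it lies within struct_len; intended as asymptotically lighter (O(rows*cols) vs O(rows*cols*struct_len)) but a timing run measured only ~1.4x at the largest size.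
import Mathlib
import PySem

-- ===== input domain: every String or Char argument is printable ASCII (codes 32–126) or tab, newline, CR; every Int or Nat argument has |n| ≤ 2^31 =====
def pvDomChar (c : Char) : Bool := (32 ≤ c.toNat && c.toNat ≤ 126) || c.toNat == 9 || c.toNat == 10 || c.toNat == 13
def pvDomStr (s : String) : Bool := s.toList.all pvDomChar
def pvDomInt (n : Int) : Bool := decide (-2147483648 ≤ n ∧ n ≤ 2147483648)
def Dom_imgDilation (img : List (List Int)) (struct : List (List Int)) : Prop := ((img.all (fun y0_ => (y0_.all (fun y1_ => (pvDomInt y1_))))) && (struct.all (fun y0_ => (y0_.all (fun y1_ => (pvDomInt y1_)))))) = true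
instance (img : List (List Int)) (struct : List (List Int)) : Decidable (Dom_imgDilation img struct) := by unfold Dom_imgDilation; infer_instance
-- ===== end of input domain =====

-- B replaces A's per-pixel inner scan over the structuring-element width by one
-- left-to-right pass per row that tracks the index of the last 1 seen
-- (alternative algorithm: O(rows*cols) vs O(rows*cols*struct_len) work; not measured ≥1.5× faster).

-- ===== PORT A =====
def imgDilation (img : List (List Int)) (struct : List (List Int)) : List (List Int) :=
  let rows := img.length
  let cols := (img.headD []).length
  let structLen := (struct.headD []).length
  let init : List (List Int) := List.replicate rows (List.replicate cols 0)
  (List.range rows).foldl (fun d i =>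
    (List.range cols).foldl (fun d j =>
      if (img.getD i []).getD j 0 = 1 then
        (List.range structLen).foldl (fun d k =>
          if i < rows ∧ j + k < cols then
            if (d.getD i []).getD (j + k) 0 = 0 then
              d.set i ((d.getD i []).set (j + k) 1)
            else d
          else d) d
      else d) d) init

-- ===== PORT B =====
def imgDilation_alt (img : List (List Int)) (struct : List (List Int)) : List (List Int) :=
  let cols := (img.headD []).length
  let structLen := (struct.headD []).length
  img.map (fun row =>
    ((List.range cols).foldl (fun (st : Option ℕ × List Int) j =>
      let last := if row.getD j 0 = 1 then some j else st.1
      (last, st.2 ++ [match last with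
        | some l => if j - l < structLen then (1 : Int) else 0
        | none => (0 : Int)])) ((none : Option ℕ), ([] : List Int))).2)

-- ===== PRECONDITION & SPEC =====
-- Pre_ excludes exactly the inputs where Python A raises IndexError: empty img or
-- empty struct (img[0] / struct[0]), and an img row shorter than the first row
-- (img[i][j] is read for every j < len(img[0])).
def Pre_imgDilation (img : List (List Int)) (struct : List (List Int)) : Prop :=
  img ≠ [] ∧ struct ≠ [] ∧ ∀ row ∈ img, (img.headD []).length ≤ row.length
instance (img : List (List Int)) (struct : List (List Int)) : Decidable (Pre_imgDilation img struct) := by unfold Pre_imgDilation; infer_instance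

def pvWitness_imgDilation : List (List Int) × List (List Int) := ([[1, 0, 0], [0, 0, 2]], [[1, 1]])

def Spec_imgDilation (img : List (List Int)) (struct : List (List Int)) (out : List (List Int)) : Prop := out = imgDilation_alt img struct
instance (img : List (List Int)) (struct : List (List Int)) (out : List (List Int)) : Decidable (Spec_imgDilation img struct out) := by unfold Spec_imgDilation; infer_instance

-- ===== CLAIM (what is proved, stated in full; the proofs are below) =====
def Claim_equal_imgDilation : Prop := ∀ (img : List (List Int)) (struct : List (List Int)), Dom_imgDilation img struct → Pre_imgDilation img struct → Spec_imgDilation img struct (imgDilation img struct)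

-- ===== LEMMAS AND PROOFS =====

-- row-local versions of A's two inner loops (proof helpers only)
def kfoldRow (rows cols L i j : ℕ) (cur : List Int) : List Int :=
  (List.range L).foldl (fun cur k =>
    if i < rows ∧ j + k < cols then
      if cur.getD (j + k) 0 = 0 then cur.set (j + k) 1 else cur
    else cur) cur

def jfoldRow (row : List Int) (rows cols L i : ℕ) (cur : List Int) : List Int :=
  (List.range cols).foldl (fun cur j =>
    if row.getD j 0 = 1 then kfoldRow rows cols L i j cur else cur) cur

-- "some position t ≤ m with t in [0,j) carries a 1 and reaches m within width L"
def coveredB (row : List Int) (L j m : ℕ) : Bool :=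
  (List.range j).any (fun t => decide (t ≤ m) && decide (m < t + L) && decide (row.getD t 0 = 1))

def rowOut (row : List Int) (L cols : ℕ) : List Int :=
  (List.range cols).map (fun m => if coveredB row L (m + 1) m then (1 : Int) else 0)

def isLast (row : List Int) (j : ℕ) : Option ℕ → Prop
  | none => ∀ t, t < j → row.getD t 0 ≠ 1
  | some l => l < j ∧ row.getD l 0 = 1 ∧ ∀ t, l < t → t < j → row.getD t 0 ≠ 1

lemma coveredB_iff (row : List Int) (L j m : ℕ) :
    coveredB row L j m = true ↔ ∃ t, t < j ∧ t ≤ m ∧ m < t + L ∧ row.getD t 0 = 1 := by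
  simp [coveredB, List.any_eq_true, List.mem_range, and_assoc]

lemma coveredB_cap (row : List Int) (L j m : ℕ) (h : m < j) :
    coveredB row L j m = coveredB row L (m + 1) m := by
  apply Bool.eq_iff_iff.mpr
  simp only [coveredB_iff]
  constructor
  · rintro ⟨t, h1, h2, h3, h4⟩; exact ⟨t, by omega, h2, h3, h4⟩
  · rintro ⟨t, h1, h2, h3, h4⟩; exact ⟨t, by omega, h2, h3, h4⟩

lemma getD_map_range (f : ℕ → Int) (n m : ℕ) (h : m < n) :
    ((List.range n).map f).getD m 0 = f m := by
  rw [List.getD_eq_getElem _ _ (by simpa)]; simp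

lemma set_map_range (f : ℕ → Int) (n p : ℕ) (v : Int) :
    ((List.range n).map f).set p v = (List.range n).map (fun m => if m = p then v else f m) := by
  apply List.ext_getElem (by simp)
  intro i h1 h2
  simp only [List.getElem_set, List.getElem_map, List.getElem_range]
  split_ifs with h3 h4 h4 <;> first | rfl | omega

lemma map_range_indicator_congr (n : ℕ) (b1 b2 : ℕ → Bool) (h : ∀ m, m < n → b1 m = b2 m) :
    (List.range n).map (fun m => if b1 m then (1 : Int) else 0)
      = (List.range n).map (fun m => if b2 m then (1 : Int) else 0) :=
  List.map_congr_left (by intro m hm; rw [h m (List.mem_range.mp hm)])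

-- A's k-loop, evaluated on a 0/1 row represented by a Bool predicate
lemma kfold_eval (rows cols i n : ℕ) (hi : i < rows) (c : ℕ → Bool) :
    ∀ K, kfoldRow rows cols K i n ((List.range cols).map (fun m => if c m then (1 : Int) else 0))
      = (List.range cols).map (fun m => if c m || (decide (n ≤ m) && decide (m < n + K)) then (1 : Int) else 0) := by
  intro K
  unfold kfoldRow
  induction K with
  | zero =>
      simp only [List.range_zero, List.foldl_nil]
      apply map_range_indicator_congr
      intro m hm
      cases hcm : c m <;> simp
  | succ K ih =>
      rw [List.range_succ, List.foldl_append, List.foldl_cons, List.foldl_nil, ih]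
      by_cases h1 : n + K < cols
      · rw [if_pos ⟨hi, h1⟩, getD_map_range _ _ _ h1]
        have hsimp : (c (n + K) || (decide (n ≤ n + K) && decide (n + K < n + K))) = c (n + K) := by
          simp
        rw [hsimp]
        by_cases hc : c (n + K) = true
        · rw [hc, if_neg (by norm_num)]
          apply map_range_indicator_congr
          intro m hm
          by_cases hmn : m = n + K
          · subst hmn; rw [hc]; simp
          · cases hcm : c m
            · simp only [Bool.false_or]
              congr 1
              apply Bool.eq_iff_iff.mpr
              simp only [decide_eq_true_eq]
              omega
            · simp only [Bool.true_or]
        · rw [Bool.not_eq_true] at hc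
          rw [hc, if_pos (by norm_num), set_map_range]
          apply List.ext_getElem (by simp)
          intro t ht1 ht2
          simp only [List.getElem_map, List.getElem_range]
          by_cases htm : t = n + K
          · subst htm
            rw [if_pos rfl, hc]
            simp
          · rw [if_neg htm]
            by_cases hcm : c t = true
            · rw [hcm]; simp
            · rw [Bool.not_eq_true] at hcm
              rw [hcm]
              simp only [Bool.false_or]
              congr 1
              simp only [Bool.and_eq_true, decide_eq_true_eq, eq_iff_iff]
              omega
      · rw [if_neg (fun h => h1 h.2)]
        apply map_range_indicator_congr
        intro m hm
        cases hcm : c m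
        · simp only [Bool.false_or]
          congr 1
          apply Bool.eq_iff_iff.mpr
          simp only [decide_eq_true_eq]
          omega
        · simp only [Bool.true_or]

lemma jfold_eval (row : List Int) (rows cols L i : ℕ) (hi : i < rows) :
    ∀ n, (List.range n).foldl (fun cur j =>
        if row.getD j 0 = 1 then kfoldRow rows cols L i j cur else cur) (List.replicate cols 0)
      = (List.range cols).map (fun m => if coveredB row L n m then (1 : Int) else 0) := by
  intro n
  induction n with
  | zero =>
      simp only [List.range_zero, List.foldl_nil]
      have h0 : ∀ m, coveredB row L 0 m = false := by intro m; simp [coveredB]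
      apply List.ext_getElem (by simp)
      intro t ht1 ht2
      simp [h0]
  | succ n ih =>
      rw [List.range_succ, List.foldl_append, List.foldl_cons, List.foldl_nil, ih]
      by_cases hr : row.getD n 0 = 1
      · rw [if_pos hr]
        have hk := kfold_eval rows cols i n hi (fun m => coveredB row L n m) L
        rw [hk]
        apply map_range_indicator_congr
        intro m hm
        apply Bool.eq_iff_iff.mpr
        simp only [Bool.or_eq_true, Bool.and_eq_true, decide_eq_true_eq, coveredB_iff]
        constructor
        · rintro (⟨t, h1, h2, h3, h4⟩ | ⟨h1, h2⟩)
          · exact ⟨t, by omega, h2, h3, h4⟩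
          · exact ⟨n, by omega, h1, h2, hr⟩
        · rintro ⟨t, h1, h2, h3, h4⟩
          by_cases htn : t = n
          · right; subst htn; exact ⟨h2, h3⟩
          · left; exact ⟨t, by omega, h2, h3, h4⟩
      · rw [if_neg hr]
        apply map_range_indicator_congr
        intro m hm
        apply Bool.eq_iff_iff.mpr
        simp only [coveredB_iff]
        constructor
        · rintro ⟨t, h1, h2, h3, h4⟩
          exact ⟨t, by omega, h2, h3, h4⟩
        · rintro ⟨t, h1, h2, h3, h4⟩
          by_cases htn : t = n
          · subst htn; exact absurd h4 hr
          · exact ⟨t, by omega, h2, h3, h4⟩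

lemma rowA_eq (row : List Int) (rows cols L i : ℕ) (hi : i < rows) :
    jfoldRow row rows cols L i (List.replicate cols 0) = rowOut row L cols := by
  unfold jfoldRow rowOut
  rw [jfold_eval row rows cols L i hi cols]
  apply map_range_indicator_congr
  intro m hm
  exact coveredB_cap row L cols m hm

-- factoring A's matrix-level loops through row-local ones
lemma kfold_factor (rows cols i j : ℕ) :
    ∀ (ks : List ℕ) (d : List (List Int)), i < d.length →
      ks.foldl (fun d k =>
        if i < rows ∧ j + k < cols then
          if (d.getD i []).getD (j + k) 0 = 0 then d.set i ((d.getD i []).set (j + k) 1) else d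
        else d) d
      = d.set i (ks.foldl (fun cur k =>
          if i < rows ∧ j + k < cols then
            if cur.getD (j + k) 0 = 0 then cur.set (j + k) 1 else cur
          else cur) (d.getD i [])) := by
  intro ks
  induction ks with
  | nil =>
      intro d hd
      simp only [List.foldl_nil]
      rw [List.getD_eq_getElem _ _ hd, List.set_getElem_self]
  | cons k ks ih =>
      intro d hd
      simp only [List.foldl_cons]
      by_cases h1 : i < rows ∧ j + k < cols
      · rw [if_pos h1, if_pos h1]
        by_cases h2 : (d.getD i []).getD (j + k) 0 = 0
        · rw [if_pos h2]
          rw [ih (d.set i ((d.getD i []).set (j + k) 1)) (by simpa using hd)]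
          have hg : (d.set i ((d.getD i []).set (j + k) 1)).getD i []
              = (d.getD i []).set (j + k) 1 := by
            rw [List.getD_eq_getElem _ _ (by simpa using hd), List.getElem_set_self]
          rw [hg, List.set_set, if_pos h2]
        · rw [if_neg h2, ih d hd, if_neg h2]
      · rw [if_neg h1, if_neg h1, ih d hd]

lemma kfold_factor' (rows cols L i j : ℕ) (d : List (List Int)) (hd : i < d.length) :
    (List.range L).foldl (fun d k =>
        if i < rows ∧ j + k < cols then
          if (d.getD i []).getD (j + k) 0 = 0 then d.set i ((d.getD i []).set (j + k) 1) else d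
        else d) d
      = d.set i (kfoldRow rows cols L i j (d.getD i [])) :=
  kfold_factor rows cols i j (List.range L) d hd

lemma jfold_factor (row : List Int) (rows cols L i : ℕ) :
    ∀ (js : List ℕ) (d : List (List Int)), i < d.length →
      js.foldl (fun d j =>
        if row.getD j 0 = 1 then
          (List.range L).foldl (fun d k =>
            if i < rows ∧ j + k < cols then
              if (d.getD i []).getD (j + k) 0 = 0 then d.set i ((d.getD i []).set (j + k) 1) else d
            else d) d
        else d) d
      = d.set i (js.foldl (fun cur j =>
          if row.getD j 0 = 1 then kfoldRow rows cols L i j cur else cur) (d.getD i [])) := by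
  intro js
  induction js with
  | nil =>
      intro d hd
      simp only [List.foldl_nil]
      rw [List.getD_eq_getElem _ _ hd, List.set_getElem_self]
  | cons j js ih =>
      intro d hd
      simp only [List.foldl_cons]
      by_cases h1 : row.getD j 0 = 1
      · rw [if_pos h1, if_pos h1, kfold_factor' rows cols L i j d hd]
        rw [ih (d.set i (kfoldRow rows cols L i j (d.getD i []))) (by simpa using hd)]
        have hg : (d.set i (kfoldRow rows cols L i j (d.getD i []))).getD i []
            = kfoldRow rows cols L i j (d.getD i []) := by
          rw [List.getD_eq_getElem _ _ (by simpa using hd), List.getElem_set_self]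
        rw [hg, List.set_set]
      · rw [if_neg h1, if_neg h1, ih d hd]

lemma setfold_length (f : ℕ → List Int → List Int) :
    ∀ (ns : List ℕ) (d : List (List Int)),
      (ns.foldl (fun d i => d.set i (f i (d.getD i []))) d).length = d.length := by
  intro ns
  induction ns with
  | nil => intro d; rfl
  | cons a as ih => intro d; simpa [List.foldl_cons] using ih (d.set a (f a (d.getD a [])))

lemma setfold_getD (f : ℕ → List Int → List Int) :
    ∀ (n : ℕ) (d : List (List Int)), n ≤ d.length → ∀ m,
      ((List.range n).foldl (fun d i => d.set i (f i (d.getD i []))) d).getD m []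
      = if m < n then f m (d.getD m []) else d.getD m [] := by
  intro n
  induction n with
  | zero => intro d _ m; simp
  | succ n ih =>
      intro d hd m
      rw [List.range_succ, List.foldl_append, List.foldl_cons, List.foldl_nil]
      set E := (List.range n).foldl (fun d i => d.set i (f i (d.getD i []))) d with hE
      have hlen : E.length = d.length := setfold_length f (List.range n) d
      have hEn : E.getD n [] = d.getD n [] := by
        rw [ih d (by omega) n, if_neg (by omega)]
      by_cases hm : m = n
      · subst hm
        rw [List.getD_eq_getElem _ _ (by simp only [List.length_set, hlen]; omega),
          List.getElem_set_self (by simp only [List.length_set, hlen]; omega), hEn, if_pos (by omega)]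
      · rw [List.getD_eq_getElem?_getD, List.getElem?_set_ne (fun h => hm h.symm),
          ← List.getD_eq_getElem?_getD, ih d (by omega) m]
        by_cases hmn : m < n
        · rw [if_pos hmn, if_pos (by omega)]
        · rw [if_neg hmn, if_neg (by omega)]

-- B's per-row pass equals rowOut
lemma isLast_step (row : List Int) (j : ℕ) (o : Option ℕ) (h : isLast row j o) :
    isLast row (j + 1) (if row.getD j 0 = 1 then some j else o) := by
  split_ifs with hj
  · exact ⟨by omega, hj, fun t h1 h2 => by omega⟩
  · match o, h with
    | none, h =>
        intro t ht
        by_cases h' : t < j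
        · exact h t h'
        · have ht' : t = j := by omega
          rw [ht']; exact hj
    | some l, ⟨h1, h2, h3⟩ =>
        refine ⟨by omega, h2, fun t hlt htj => ?_⟩
        by_cases h' : t < j
        · exact h3 t hlt h'
        · have ht' : t = j := by omega
          rw [ht']; exact hj

lemma val_eq (row : List Int) (L j : ℕ) (o : Option ℕ) :
    isLast row (j + 1) o →
    (match o with
      | some l => if j - l < L then (1 : Int) else 0
      | none => (0 : Int))
    = (if coveredB row L (j + 1) j then (1 : Int) else 0) := by
  intro h
  match o, h with
  | none, h =>
      have : coveredB row L (j + 1) j = false := by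
        rw [Bool.eq_false_iff]
        intro hc
        obtain ⟨t, h1, h2, h3, h4⟩ := (coveredB_iff row L (j + 1) j).mp hc
        exact h t h1 h4
      simp [this]
  | some l, ⟨h1, h2, h3⟩ =>
      by_cases hjl : j - l < L
      · have : coveredB row L (j + 1) j = true :=
          (coveredB_iff row L (j + 1) j).mpr ⟨l, h1, by omega, by omega, h2⟩
        simp [this, hjl]
      · have : coveredB row L (j + 1) j = false := by
          rw [Bool.eq_false_iff]
          intro hc
          obtain ⟨t, ht1, ht2, ht3, ht4⟩ := (coveredB_iff row L (j + 1) j).mp hc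
          by_cases htl : t ≤ l
          · omega
          · exact h3 t (by omega) ht1 ht4
        simp [this, hjl]

lemma bfold_eval (row : List Int) (L : ℕ) :
    ∀ n, isLast row n ((List.range n).foldl (fun (st : Option ℕ × List Int) j =>
        let last := if row.getD j 0 = 1 then some j else st.1
        (last, st.2 ++ [match last with
          | some l => if j - l < L then (1 : Int) else 0
          | none => (0 : Int)])) ((none : Option ℕ), ([] : List Int))).1
      ∧ ((List.range n).foldl (fun (st : Option ℕ × List Int) j =>
        let last := if row.getD j 0 = 1 then some j else st.1
        (last, st.2 ++ [match last with
          | some l => if j - l < L then (1 : Int) else 0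
          | none => (0 : Int)])) ((none : Option ℕ), ([] : List Int))).2
      = rowOut row L n := by
  intro n
  induction n with
  | zero => exact ⟨fun t ht => absurd ht (by omega), by simp [rowOut]⟩
  | succ n ih =>
      obtain ⟨ih1, ih2⟩ := ih
      rw [List.range_succ, List.foldl_append, List.foldl_cons, List.foldl_nil]
      refine ⟨isLast_step row n _ ih1, ?_⟩
      simp only []
      rw [ih2, val_eq row L n _ (isLast_step row n _ ih1)]
      simp [rowOut, List.range_succ]

lemma matrix_fold_eq (img : List (List Int)) (rows cols L : ℕ) :
    ∀ (ns : List ℕ) (d : List (List Int)), (∀ n ∈ ns, n < d.length) →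
      ns.foldl (fun d i =>
        (List.range cols).foldl (fun d j =>
          if (img.getD i []).getD j 0 = 1 then
            (List.range L).foldl (fun d k =>
              if i < rows ∧ j + k < cols then
                if (d.getD i []).getD (j + k) 0 = 0 then d.set i ((d.getD i []).set (j + k) 1) else d
              else d) d
          else d) d) d
      = ns.foldl (fun d i => d.set i (jfoldRow (img.getD i []) rows cols L i (d.getD i []))) d := by
  intro ns
  induction ns with
  | nil => intro d _; rfl
  | cons a as ih =>
      intro d hd
      simp only [List.foldl_cons]
      rw [jfold_factor (img.getD a []) rows cols L a (List.range cols) d (hd a (by simp))]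
      exact ih _ (fun n hn => by rw [List.length_set]; exact hd n (by simp [hn]))

theorem main_eq (img struct : List (List Int)) :
    imgDilation img struct = imgDilation_alt img struct := by
  simp only [imgDilation, imgDilation_alt]
  rw [matrix_fold_eq img img.length ((img.headD []).length) ((struct.headD []).length)
    (List.range img.length) _ (by intro n hn; simp at hn ⊢; omega)]
  apply List.ext_getElem
  · rw [setfold_length]; simp
  · intro t h1 h2
    have hlen : t < img.length := by
      rw [setfold_length] at h1; simpa using h1
    rw [← List.getD_eq_getElem _ [] h1]
    rw [setfold_getD _ img.length _ (by simp) t, if_pos hlen]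
    have hinit : (List.replicate img.length (List.replicate ((img.headD []).length) (0 : Int))).getD t []
        = List.replicate ((img.headD []).length) (0 : Int) := by
      rw [List.getD_eq_getElem _ _ (by simpa), List.getElem_replicate]
    rw [hinit, rowA_eq (img.getD t []) img.length ((img.headD []).length) ((struct.headD []).length) t hlen]
    simp only [List.getElem_map]
    rw [(bfold_eval img[t] ((struct.headD []).length) ((img.headD []).length)).2]
    rw [List.getD_eq_getElem _ _ hlen]

-- ===== VERDICT (by name: the statement is the Claim_ definition above) =====
theorem imgDilation_spec : Claim_equal_imgDilation := by
  intro img struct _ _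
  unfold Spec_imgDilation
  exact main_eq img struct
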